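-- pv_equiv track=rewrite | github.com/abhisavaliya/opencv_controller | classes-nfs.py | normalize_hand
-- ===== SOURCE A (Python) =====
-- def normalize_hand(list1):
--     temp_list=list1.copy()
--
--     for i in range(len(temp_list)):
--         angle=temp_list[i]
--         if(angle<=5):
--             temp_list[i]=5
--         elif((angle>5) & (angle<=30)):
--             temp_list[i]=30
--         elif((angle>30) & (angle<=45)):
--             temp_list[i]=45
--         elif((angle>45) & (angle<=60)):
--             temp_list[i]=60
--         elif((angle>60) & (angle<=75)):
--             temp_list[i]=75
--         elif((angle>75) & (angle<=90)):
--             temp_list[i]=90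
--     return temp_list
-- ===== SOURCE B (Python) =====
-- _BOUNDS = [5, 30, 45, 60, 75, 90]
--
-- def normalize_hand(list1):
--     out = []
--     for angle in list1:
--         lo, hi = 0, len(_BOUNDS)
--         while lo < hi:
--             mid = (lo + hi) // 2
--             if _BOUNDS[mid] < angle:
--                 lo = mid + 1
--             else:
--                 hi = mid
--         out.append(_BOUNDS[lo] if lo < len(_BOUNDS) else angle)
--     return out
-- ===== Notes on version B (the rewrite author's own statement) =====
-- stated objective: alternative
-- what changed: Replaced A's six-branch if/elif comparison cascade that rewrites a copied list in place by index with a bisect_left-style binary search over a sorted six-entry threshold table, appending each bucketed value to a fresh output list.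
import Mathlib
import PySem

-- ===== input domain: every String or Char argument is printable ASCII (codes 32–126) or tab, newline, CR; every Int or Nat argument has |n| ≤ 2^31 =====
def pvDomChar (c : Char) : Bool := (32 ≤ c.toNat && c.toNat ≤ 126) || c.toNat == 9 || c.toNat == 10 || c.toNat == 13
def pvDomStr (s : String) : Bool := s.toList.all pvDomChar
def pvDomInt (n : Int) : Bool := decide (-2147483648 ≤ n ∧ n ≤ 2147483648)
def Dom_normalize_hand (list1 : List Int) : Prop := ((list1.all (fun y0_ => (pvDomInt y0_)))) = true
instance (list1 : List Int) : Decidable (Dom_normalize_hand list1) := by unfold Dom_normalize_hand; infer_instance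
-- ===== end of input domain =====

-- B replaces A's six-branch comparison cascade (which rewrites a copied list in place by
-- index) with a hand-written bisect_left binary search over a sorted threshold table,
-- appending to a fresh output list (objective: alternative).

-- ===== PORT A =====
-- one iteration of A's index loop: read temp_list[i], rewrite it through the cascade
def nhStep (temp : List Int) (i : Int) : List Int :=
  let angle := PySem.List.pyGetD temp i 0
  if angle ≤ 5 then PySem.List.pySetD temp i 5
  else if 5 < angle ∧ angle ≤ 30 then PySem.List.pySetD temp i 30
  else if 30 < angle ∧ angle ≤ 45 then PySem.List.pySetD temp i 45
  else if 45 < angle ∧ angle ≤ 60 then PySem.List.pySetD temp i 60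
  else if 60 < angle ∧ angle ≤ 75 then PySem.List.pySetD temp i 75
  else if 75 < angle ∧ angle ≤ 90 then PySem.List.pySetD temp i 90
  else temp

def normalize_hand (list1 : List Int) : List Int :=
  (PySem.List.pyRange 0 list1.length 1).foldl nhStep list1

-- ===== PORT B =====
def nhBounds : List Int := [5, 30, 45, 60, 75, 90]

-- Source B's hand-written binary search loop 'while lo < hi: …' (bisect_left)
def nhSearch (angle lo hi : Int) : Int :=
  if h : lo < hi then
    let mid := PySem.Int.floordiv (lo + hi) 2
    if PySem.List.pyGetD nhBounds mid 0 < angle then nhSearch angle (mid + 1) hi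
    else nhSearch angle lo mid
  else lo
termination_by (hi - lo).toNat
decreasing_by
  · have h1 := (PySem.Int.le_floordiv_iff_mul_le (a := lo + hi) (b := 2) (q := lo) (by omega)).mpr (by omega)
    omega
  · have h2 := (PySem.Int.floordiv_lt_iff_lt_mul (a := lo + hi) (b := 2) (q := hi) (by omega)).mpr (by omega)
    omega

def nhAltElem (angle : Int) : Int :=
  let lo := nhSearch angle 0 (nhBounds.length : Int)
  if lo < (nhBounds.length : Int) then PySem.List.pyGetD nhBounds lo 0 else angle

def normalize_hand_alt (list1 : List Int) : List Int :=
  list1.foldl (fun out angle => out ++ [nhAltElem angle]) []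

-- ===== PRECONDITION & SPEC =====
def Spec_normalize_hand (list1 : List Int) (out : List Int) : Prop := out = normalize_hand_alt list1
instance (list1 : List Int) (out : List Int) : Decidable (Spec_normalize_hand list1 out) := by unfold Spec_normalize_hand; infer_instance

-- ===== CLAIM (what is proved, stated in full; the proofs are below) =====
def Claim_equal_normalize_hand : Prop := ∀ (list1 : List Int), Dom_normalize_hand list1 → Spec_normalize_hand list1 (normalize_hand list1)

-- ===== LEMMAS AND PROOFS =====

-- A's per-element cascade, as the function its loop body applies to each slot
def nhCasc (angle : Int) : Int :=
  if angle ≤ 5 then 5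
  else if 5 < angle ∧ angle ≤ 30 then 30
  else if 30 < angle ∧ angle ≤ 45 then 45
  else if 45 < angle ∧ angle ≤ 60 then 60
  else if 60 < angle ∧ angle ≤ 75 then 75
  else if 75 < angle ∧ angle ≤ 90 then 90
  else angle

-- B's binary search over the 6-entry table, fully evaluated
theorem nhSearch_eval (a : Int) : nhSearch a 0 6 =
    if a ≤ 5 then 0 else if a ≤ 30 then 1 else if a ≤ 45 then 2
    else if a ≤ 60 then 3 else if a ≤ 75 then 4 else if a ≤ 90 then 5 else 6 := by
  repeat
    rw [nhSearch]
    norm_num [nhBounds, PySem.List.pyGetD, PySem.List.pyGet?, PySem.List.pyIdx?,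
      show PySem.Int.floordiv 6 2 = 3 from by decide, show PySem.Int.floordiv 3 2 = 1 from by decide,
      show PySem.Int.floordiv 1 2 = 0 from by decide, show PySem.Int.floordiv 5 2 = 2 from by decide,
      show PySem.Int.floordiv 9 2 = 4 from by decide, show PySem.Int.floordiv 11 2 = 5 from by decide,
      show PySem.Int.floordiv 7 2 = 3 from by decide, show PySem.Int.floordiv 2 2 = 1 from by decide,
      show PySem.Int.floordiv 4 2 = 2 from by decide, show PySem.Int.floordiv 8 2 = 4 from by decide,
      show PySem.Int.floordiv 10 2 = 5 from by decide,
      show Int.toNat 0 = 0 from rfl, show Int.toNat 1 = 1 from rfl, show Int.toNat 2 = 2 from rfl,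
      show Int.toNat 3 = 3 from rfl, show Int.toNat 4 = 4 from rfl, show Int.toNat 5 = 5 from rfl,
      List.getElem_cons_zero, List.getElem_cons_succ]
  split_ifs <;> omega

-- the two per-element functions agree on every Int
theorem nhElem_eq (a : Int) : nhCasc a = nhAltElem a := by
  unfold nhCasc nhAltElem
  simp only [show ((nhBounds.length : Int)) = 6 from rfl, nhSearch_eval]
  split_ifs <;> first | rfl | decide | omega

-- A's loop body at slot done.length rewrites exactly that slot through the cascade
theorem nhStep_at (d t : List Int) (x : Int) :
    nhStep (d ++ x :: t) (d.length : Int) = d ++ nhCasc x :: t := by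
  have hg : PySem.List.pyGetD (d ++ x :: t) (d.length : Int) 0 = x := by
    simp [List.getD]
  have hs : ∀ v : Int, PySem.List.pySetD (d ++ x :: t) (d.length : Int) v = d ++ v :: t := by
    intro v; simp
  unfold nhStep nhCasc
  rw [hg]
  simp only [hs]
  split_ifs <;> rfl

-- invariant of A's index loop: slots before the cursor are already normalized
theorem nhLoop (l : List Int) : ∀ (done : List Int),
    (PySem.List.pyRange (done.length : Int) ((done.length : Int) + l.length) 1).foldl nhStep (done ++ l)
      = done ++ l.map nhCasc := by
  induction l with
  | nil => intro d; simp [PySem.List.pyRange_one_eq_nil]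
  | cons x xs ih =>
    intro d
    rw [PySem.List.pyRange_one_cons (by push_cast [List.length_cons]; omega), List.foldl_cons, nhStep_at]
    have h2 := ih (d ++ [nhCasc x])
    have hlen : ((d ++ [nhCasc x]).length : Int) = (d.length : Int) + 1 := by simp
    rw [hlen] at h2
    have harg : (d.length : Int) + 1 + (xs.length : Int) = (d.length : Int) + ((x :: xs).length : Int) := by
      push_cast [List.length_cons]; omega
    rw [harg] at h2
    simpa using h2

theorem nhA_eq_map (l : List Int) : normalize_hand l = l.map nhCasc := by
  simpa [normalize_hand] using nhLoop l []

theorem nhAlt_eq_map (l : List Int) : normalize_hand_alt l = l.map nhAltElem := by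
  simpa [normalize_hand_alt] using PySem.List.foldl_append_singleton_eq_map nhAltElem l []

-- ===== VERDICT (by name: the statement is the Claim_ definition above) =====
theorem normalize_hand_spec : Claim_equal_normalize_hand := by
  intro l _
  unfold Spec_normalize_hand
  rw [nhA_eq_map, nhAlt_eq_map]
  exact List.map_congr_left fun a _ => nhElem_eq a
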